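-- pv_equiv track=rewrite | github.com/Lee-hyeonkyu/co-te | 디펜스게임.py | solution
-- ===== SOURCE A (Python) =====
-- import heapq as q
--
-- def solution(n, k, enemy):
--     lst = []
--     for i in range(len(enemy)):
--         q.heappush(lst, enemy[i])
--         if len(lst) > k:
--             n -= q.heappop(lst)
--         if n < 0:
--             return i
--     return len(enemy)
-- ===== SOURCE B (Python) =====
-- def solution(n, k, enemy):
--     kk = k if k > 0 else 0
--     for r in range(len(enemy)):
--         pre = sorted(enemy[:r + 1])
--         cut = (r + 1) - min(kk, r + 1)
--         if sum(pre[:cut]) > n: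
--             return r
--     return len(enemy)
-- ===== Notes on version B (the rewrite author's own statement) =====
-- stated objective: alternative
-- what changed: A simulates the game with an incremental min-heap and a running health counter; B recomputes each round's total cost in closed form (sum of the sorted prefix minus its top min(k, r+1) values) and returns the first round whose cost exceeds n.
import Mathlib
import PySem

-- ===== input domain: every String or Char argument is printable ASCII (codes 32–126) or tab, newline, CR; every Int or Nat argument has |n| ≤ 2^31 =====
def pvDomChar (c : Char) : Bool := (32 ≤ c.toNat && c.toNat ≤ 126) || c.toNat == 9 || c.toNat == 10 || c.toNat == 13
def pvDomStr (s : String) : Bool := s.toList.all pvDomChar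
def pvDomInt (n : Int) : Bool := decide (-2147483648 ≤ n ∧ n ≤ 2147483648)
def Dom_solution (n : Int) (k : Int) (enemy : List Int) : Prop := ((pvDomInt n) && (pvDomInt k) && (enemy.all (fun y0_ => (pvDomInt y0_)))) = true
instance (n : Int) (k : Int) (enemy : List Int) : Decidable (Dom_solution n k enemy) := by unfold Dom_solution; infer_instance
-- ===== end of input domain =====

-- B replaces A's incremental min-heap/running-health loop by a per-round closed-form cost
-- (prefix sum minus the top-min(k,r+1) values of the sorted prefix); objective: alternative.

-- ===== PORT A =====
-- heapq is modelled as a list kept in ascending order: heappush = ordered insert,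
-- heappop = take the head (the minimum).  Length, popped minimum and contents as a
-- multiset coincide with Python's binary heap, so the port is exact.
def insSorted (e : Int) : List Int → List Int
  | [] => [e]
  | b :: t => if e ≤ b then e :: b :: t else b :: insSorted e t

def solutionGo (k : Int) (n : Int) (lst : List Int) (i : Nat) (total : Nat) : List Int → Int
  | [] => (total : Int)
  | e :: rest =>
    let lst1 := insSorted e lst
    let n1 := if (lst1.length : Int) > k then n - lst1.headI else n
    let lst2 := if (lst1.length : Int) > k then lst1.tail else lst1
    if n1 < 0 then (i : Int) else solutionGo k n1 lst2 (i + 1) total rest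

def solution (n : Int) (k : Int) (enemy : List Int) : Int :=
  solutionGo k n [] 0 enemy.length enemy

-- ===== PORT B =====
def kkOf (k : Int) : Nat := if k > 0 then k.toNat else 0

-- cost of clearing rounds 0..r with the skills spent on the largest min(kk, r+1)
-- enemies of the prefix (pre = enemy[:r+1]): sum of the untouched smallest ones.
def costB (kk : Nat) (pre : List Int) : Int :=
  ((PySem.List.sorted pre (fun x => x)).take (pre.length - min kk pre.length)).sum

def altGo (n : Int) (kk : Nat) (enemy : List Int) (r : Nat) : Nat → Int
  | 0 => (enemy.length : Int)
  | fuel + 1 =>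
    if costB kk (enemy.take (r + 1)) > n then (r : Int)
    else altGo n kk enemy (r + 1) fuel

def solution_alt (n : Int) (k : Int) (enemy : List Int) : Int :=
  altGo n (kkOf k) enemy 0 enemy.length

-- ===== PRECONDITION & SPEC =====
def Spec_solution (n : Int) (k : Int) (enemy : List Int) (out : Int) : Prop := out = solution_alt n k enemy
instance (n : Int) (k : Int) (enemy : List Int) (out : Int) : Decidable (Spec_solution n k enemy out) := by unfold Spec_solution; infer_instance

-- ===== CLAIM (what is proved, stated in full; the proofs are below) =====
def Claim_equal_solution : Prop := ∀ (n : Int) (k : Int) (enemy : List Int), Dom_solution n k enemy → Spec_solution n k enemy (solution n k enemy)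

-- ===== LEMMAS AND PROOFS =====

theorem perm_insSorted (e : Int) (s : List Int) : (insSorted e s).Perm (e :: s) := by
  induction s with
  | nil => simp [insSorted]
  | cons b t ih =>
    simp only [insSorted]
    split
    · exact List.Perm.refl _
    · exact (List.Perm.cons b ih).trans (List.Perm.swap e b t)

theorem length_insSorted (e : Int) (s : List Int) : (insSorted e s).length = s.length + 1 :=
  (perm_insSorted e s).length_eq

theorem pairwise_insSorted (e : Int) (s : List Int) (h : s.Pairwise (· ≤ ·)) :
    (insSorted e s).Pairwise (· ≤ ·) := by
  induction s with
  | nil => simp [insSorted]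
  | cons b t ih =>
    rcases List.pairwise_cons.mp h with ⟨hb, ht⟩
    simp only [insSorted]
    split
    · rename_i hle
      refine List.pairwise_cons.mpr ⟨?_, h⟩
      intro x hx
      rcases List.mem_cons.mp hx with rfl | hx
      · exact hle
      · exact le_trans hle (hb x hx)
    · rename_i hgt
      refine List.pairwise_cons.mpr ⟨?_, ih ht⟩
      intro x hx
      rcases List.mem_cons.mp ((perm_insSorted e t).mem_iff.mp hx) with rfl | hx
      · omega
      · exact hb x hx

theorem insSorted_of_forall_le (e : Int) (s : List Int) (h : ∀ x ∈ s, e ≤ x) :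
    insSorted e s = e :: s := by
  cases s with
  | nil => rfl
  | cons b t => simp [insSorted, h b (by simp)]

theorem sorted_append_singleton (pre : List Int) (e : Int) :
    PySem.List.sorted (pre ++ [e]) (fun x => x) =
      insSorted e (PySem.List.sorted pre (fun x => x)) := by
  refine PySem.List.sorted_id_eq_of_perm_of_pairwise _ _ ?_ ?_
  · exact (perm_insSorted e _).trans
      (((PySem.List.sorted_perm pre (fun x => x) false).cons e).trans (List.perm_append_comm (l₁ := [e]) (l₂ := pre)))
  · exact pairwise_insSorted e _ (by simpa using PySem.List.sorted_pairwise pre (fun x => x))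

-- K1: popping after the push commutes with the drop-d view of the heap
theorem tail_insSorted_drop (e : Int) (d : Nat) (s : List Int) (h : s.Pairwise (· ≤ ·)) :
    (insSorted e (s.drop d)).tail = (insSorted e s).drop (d + 1) := by
  induction d generalizing s with
  | zero => simp [List.drop_one]
  | succ d ih =>
    cases s with
    | nil => simp [insSorted]
    | cons b t =>
      rcases List.pairwise_cons.mp h with ⟨hb, ht⟩
      simp only [List.drop_succ_cons, insSorted]
      split
      · rename_i hle
        rw [insSorted_of_forall_le e (t.drop d)
          (fun x hx => le_trans hle (hb x (List.mem_of_mem_drop hx)))]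
        simp
      · rw [ih t ht]
        simp

-- K2: the popped minimum accounts exactly for the growth of the discarded-prefix sum
theorem sum_take_insSorted (e : Int) (d : Nat) (s : List Int) (h : s.Pairwise (· ≤ ·)) :
    (s.take d).sum + (insSorted e (s.drop d)).headI = ((insSorted e s).take (d + 1)).sum := by
  induction d generalizing s with
  | zero =>
    cases hs : insSorted e s with
    | nil => exact absurd (congrArg List.length hs) (by simp [length_insSorted])
    | cons a l => simp [hs]
  | succ d ih =>
    cases s with
    | nil => simp [insSorted]
    | cons b t =>
      rcases List.pairwise_cons.mp h with ⟨hb, ht⟩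
      simp only [List.drop_succ_cons, List.take_succ_cons, insSorted]
      split
      · rename_i hle
        rw [insSorted_of_forall_le e (t.drop d)
          (fun x hx => le_trans hle (hb x (List.mem_of_mem_drop hx)))]
        simp [List.take_succ_cons]
        ring
      · rw [List.take_succ_cons, List.sum_cons, List.sum_cons, ← ih t ht]
        ring

theorem cond_iff (k : Int) (len : Nat) :
    (((min (kkOf k) len + 1 : Nat) : Int) > k) ↔ kkOf k ≤ len := by
  unfold kkOf
  split <;> omega

theorem go_eq (k n0 : Int) (enemy : List Int) :
    ∀ (rest pre : List Int), pre ++ rest = enemy →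
      solutionGo k (n0 - costB (kkOf k) pre)
          ((PySem.List.sorted pre (fun x => x)).drop (pre.length - min (kkOf k) pre.length))
          pre.length enemy.length rest
        = altGo n0 (kkOf k) enemy pre.length rest.length := by
  intro rest
  induction rest with
  | nil => intro pre h; simp [solutionGo, altGo]
  | cons e rest' ih =>
    intro pre hsplit
    set kk := kkOf k with hkk
    set s := PySem.List.sorted pre (fun x => x) with hs
    set len := pre.length with hlen
    have hslen : s.length = len := by
      rw [hs, hlen]; exact PySem.List.length_sorted pre (fun x => x) false
    have hspw : s.Pairwise (· ≤ ·) := by simpa [hs] using PySem.List.sorted_pairwise pre (fun x => x)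
    have hlen1 : (insSorted e (s.drop (len - min kk len))).length = min kk len + 1 := by
      rw [length_insSorted, List.length_drop, hslen]; omega
    have htake : enemy.take (len + 1) = pre ++ [e] := by
      rw [← hsplit, List.take_append]
      simp [hlen]
    have hprelen : (pre ++ [e]).length = len + 1 := by simp [hlen]
    have hsort' : PySem.List.sorted (pre ++ [e]) (fun x => x) = insSorted e s :=
      sorted_append_singleton pre e
    simp only [solutionGo, altGo, List.length_cons, hlen1]
    by_cases hk : kk ≤ len
    · -- pop branch
      have hgt : ((min kk len + 1 : Nat) : Int) > k := (cond_iff k len).mpr hk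
      rw [if_pos hgt, if_pos hgt]
      have hmin : min kk len = kk := by omega
      have hmin' : min kk (len + 1) = kk := by omega
      have hcost' : costB kk (pre ++ [e]) =
          ((insSorted e s).take (len - kk + 1)).sum := by
        have e1 : len + 1 - min kk (len + 1) = len - kk + 1 := by omega
        rw [costB, hsort', hprelen, e1]
      have hn1 : n0 - costB kk pre - (insSorted e (s.drop (len - min kk len))).headI =
          n0 - costB kk (pre ++ [e]) := by
        rw [hcost', costB, ← hs, hmin]
        have hK2 := sum_take_insSorted e (len - kk) s hspw
        linarith [hK2]
      simp only [hn1, htake]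
      have hcond : n0 - costB kk (pre ++ [e]) < 0 ↔ costB kk (pre ++ [e]) > n0 := by omega
      rw [if_congr hcond rfl rfl]
      split
      · rfl
      · have htail : (insSorted e (s.drop (len - min kk len))).tail =
            (PySem.List.sorted (pre ++ [e]) (fun x => x)).drop (len + 1 - min kk (len + 1)) := by
          have e2 : len + 1 - min kk (len + 1) = len - kk + 1 := by omega
          rw [hmin, hsort', tail_insSorted_drop e (len - kk) s hspw, e2]
        rw [htail]
        have := ih (pre ++ [e]) (by rw [List.append_assoc]; exact hsplit)
        rw [hprelen] at this
        exact this
    · -- no pop: heap still below capacity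
      have hng : ¬ (((min kk len + 1 : Nat) : Int) > k) := fun hgt => hk ((cond_iff k len).mp hgt)
      rw [if_neg hng, if_neg hng]
      have hmin : min kk len = len := by omega
      have hmin' : min kk (len + 1) = len + 1 := by omega
      have hcost0 : costB kk pre = 0 := by
        rw [costB, ← hs]
        have e3 : pre.length - min kk pre.length = 0 := by rw [← hlen]; omega
        rw [e3]
        simp
      have hcost0' : costB kk (pre ++ [e]) = 0 := by
        rw [costB, hprelen, hmin']; simp
      simp only [hcost0, htake, hcost0']
      have hdrop : len - min kk len = 0 := by omega
      rw [hdrop, List.drop_zero]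
      have hcond : n0 - 0 < 0 ↔ (0 : Int) > n0 := by omega
      rw [if_congr hcond rfl rfl]
      split
      · rfl
      · have hheap : insSorted e s =
            (PySem.List.sorted (pre ++ [e]) (fun x => x)).drop (len + 1 - min kk (len + 1)) := by
          have e2 : len + 1 - min kk (len + 1) = 0 := by omega
          rw [hsort', e2, List.drop_zero]
        rw [hheap]
        have := ih (pre ++ [e]) (by rw [List.append_assoc]; exact hsplit)
        rw [hprelen, hcost0'] at this
        exact this

-- ===== VERDICT (by name: the statement is the Claim_ definition above) =====
theorem solution_spec : Claim_equal_solution := by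
  intro n k enemy _
  unfold Spec_solution solution solution_alt
  have := go_eq k n enemy enemy [] (by simp)
  simpa [costB] using this
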